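-- pv_equiv track=rewrite | github.com/cbrown564-alt/dissertation-recursive | src/evidence_resolver.py | _expand_to_sentence
-- ===== SOURCE A (Python) =====
-- def _expand_to_sentence(source_text: str, quote: str) -> str:
--     """Expand a substring to its containing sentence-like span."""
--     if not quote:
--         return quote
--     idx = source_text.find(quote)
--     if idx < 0:
--         return quote
--     # Simple sentence boundary heuristics
--     start = idx
--     while start > 0 and source_text[start - 1] not in {".\n", "!", "?", "\n"}:
--         start -= 1
--     end = idx + len(quote)
--     while end < len(source_text) and source_text[end] not in {".\n", "!", "?", "\n"}:
--         end += 1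
--     # Trim whitespace
--     while start < end and source_text[start] in " \t":
--         start += 1
--     while end > start and source_text[end - 1] in " \t":
--         end -= 1
--     return source_text[start:end]
-- ===== SOURCE B (Python) =====
-- def _expand_to_sentence(source_text: str, quote: str) -> str:
--     """Expand a substring to its containing sentence-like span."""
--     if not quote:
--         return quote
--     idx = source_text.find(quote)
--     if idx < 0:
--         return quote
--     # Index every sentence-boundary position once, then look the span up in it.
--     bpos = [i for i, c in enumerate(source_text) if c in "!?\n"]
--     start = next((p + 1 for p in reversed(bpos) if p < idx), 0)
--     tail = idx + len(quote)
--     end = next((p for p in bpos if p >= tail), len(source_text))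
--     return source_text[start:end].strip(" \t")
-- ===== Notes on version B (the rewrite author's own statement) =====
-- stated objective: alternative
-- what changed: B builds one index of all sentence-boundary positions (enumerate + filter) and answers by lookup in it (last boundary before the match, first at-or-after its end) plus a single strip(' \t'), replacing A's four local index-walking while-loops; the dead '.\n' set entry is dropped (a one-char string never equals it).
import Mathlib
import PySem

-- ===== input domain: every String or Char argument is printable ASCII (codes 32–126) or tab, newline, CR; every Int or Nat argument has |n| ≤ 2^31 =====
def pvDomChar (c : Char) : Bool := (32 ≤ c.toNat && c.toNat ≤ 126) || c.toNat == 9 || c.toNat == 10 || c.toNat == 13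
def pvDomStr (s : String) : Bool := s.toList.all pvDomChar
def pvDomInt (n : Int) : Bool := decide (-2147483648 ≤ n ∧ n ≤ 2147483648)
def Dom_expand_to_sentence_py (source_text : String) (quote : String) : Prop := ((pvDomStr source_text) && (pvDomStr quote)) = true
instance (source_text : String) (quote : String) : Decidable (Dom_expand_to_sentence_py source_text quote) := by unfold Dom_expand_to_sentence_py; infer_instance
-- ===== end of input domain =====

-- B replaces A's four local index-walking while-loops: it indexes ALL sentence-boundary
-- positions of the text once (enumerate + filter), looks the span up in that index
-- (last boundary before the match / first at-or-after its end) and strips " \t" once.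

-- ===== PORT A =====
-- Python: `source_text[pos] not in {".\n", "!", "?", "\n"}` — the char (a 1-char string) is
-- compared against the four literal strings of the set; ".\n" has length 2 so it never matches.
def pvAnotB (c : Char) : Bool :=
  !([c] == ['.', '\n'] || [c] == ['!'] || [c] == ['?'] || [c] == ['\n'])

-- Python: `source_text[pos] in " \t"`
def pvIsWT (c : Char) : Bool := [c] == [' '] || [c] == ['\t']

-- `while start > 0 and source_text[start-1] not in {...}: start -= 1`
-- (index start-1 is always in range on every call A makes, so getD is exact)
def pvLeftScanA (cs : List Char) : Nat → Nat
  | 0 => 0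
  | s+1 => if pvAnotB (cs.getD s ' ') then pvLeftScanA cs s else s+1

-- `while end < len(source_text) and source_text[end] not in {...}: end += 1`
def pvRightScanA (cs : List Char) (e : Nat) : Nat :=
  if e < cs.length then
    if pvAnotB (cs.getD e ' ') then pvRightScanA cs (e+1) else e
  else e
termination_by cs.length - e
decreasing_by omega

-- `while start < end and source_text[start] in " \t": start += 1`
def pvTrimLA (cs : List Char) (e s : Nat) : Nat :=
  if h : s < e ∧ pvIsWT (cs.getD s ' ') then pvTrimLA cs e (s+1) else s
termination_by e - s
decreasing_by omega

-- `while end > start and source_text[end-1] in " \t": end -= 1`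
def pvTrimRA (cs : List Char) (s e : Nat) : Nat :=
  if h : s < e ∧ pvIsWT (cs.getD (e-1) ' ') then pvTrimRA cs s (e-1) else e
termination_by e - s
decreasing_by omega

def expand_to_sentence_py (source_text : String) (quote : String) : String :=
  if quote = "" then quote
  else
    let idx := PySem.Str.find source_text quote
    if idx < 0 then quote
    else
      let cs := source_text.toList
      let start := pvLeftScanA cs idx.toNat
      let e := pvRightScanA cs (idx.toNat + quote.toList.length)
      let start2 := pvTrimLA cs e start
      let e2 := pvTrimRA cs start2 e
      PySem.Str.slice source_text (some (start2 : Int)) (some (e2 : Int))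

-- ===== PORT B =====
-- Python: `c in "!?\n"` (membership of a single char in the 3-char string)
def pvBoundaryB (c : Char) : Bool := (['!', '?', '\n'] : List Char).contains c

def expand_to_sentence_py_alt (source_text : String) (quote : String) : String :=
  if quote = "" then quote
  else
    let idx := PySem.Str.find source_text quote
    if idx < 0 then quote
    else
      -- `bpos = [i for i, c in enumerate(source_text) if c in "!?\n"]`
      let bpos := ((PySem.List.enumerate source_text.toList 0).filter
                    (fun p => pvBoundaryB p.2)).map (fun p => p.1)
      -- `next((p + 1 for p in reversed(bpos) if p < idx), 0)`
      let start := ((bpos.reverse.find? (fun p => decide (p < idx))).map (fun p => p + 1)).getD 0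
      let tail := idx + PySem.Str.len quote
      -- `next((p for p in bpos if p >= tail), len(source_text))`
      let e := (bpos.find? (fun p => decide (tail ≤ p))).getD (PySem.Str.len source_text)
      PySem.Str.stripChars (PySem.Str.slice source_text (some start) (some e)) " \t"

-- ===== PRECONDITION & SPEC =====
def Spec_expand_to_sentence_py (source_text : String) (quote : String) (out : String) : Prop := out = expand_to_sentence_py_alt source_text quote
instance (source_text : String) (quote : String) (out : String) : Decidable (Spec_expand_to_sentence_py source_text quote out) := by unfold Spec_expand_to_sentence_py; infer_instance

-- ===== CLAIM (what is proved, stated in full; the proofs are below) =====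
def Claim_equal_expand_to_sentence_py : Prop := ∀ (source_text : String) (quote : String), Dom_expand_to_sentence_py source_text quote → Spec_expand_to_sentence_py source_text quote (expand_to_sentence_py source_text quote)

-- ===== LEMMAS AND PROOFS =====

def pvIsB (c : Char) : Bool := c == '!' || c == '?' || c == '\n'

theorem pvAnotB_eq (c : Char) : pvAnotB c = !pvIsB c := by
  simp [pvAnotB, pvIsB]

theorem pvBoundaryB_eq (c : Char) : pvBoundaryB c = pvIsB c := by
  by_cases h1 : c = '!' <;> by_cases h2 : c = '?' <;> by_cases h3 : c = '\n' <;>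
    simp [pvBoundaryB, pvIsB, h1, h2, h3]

theorem pvLeftScanA_eq (cs : List Char) (s : Nat) (hs : s ≤ cs.length) :
    pvLeftScanA cs s = s - ((cs.take s).reverse.takeWhile (fun c => !pvIsB c)).length := by
  induction s with
  | zero => simp [pvLeftScanA]
  | succ n ih =>
    have hn : n < cs.length := by omega
    have htake : (cs.take (n+1)).reverse = cs[n] :: (cs.take n).reverse := by
      rw [List.take_succ]
      simp [List.getElem?_eq_getElem hn]
    have hg : cs.getD n ' ' = cs[n] := List.getD_eq_getElem cs ' ' hn
    rw [pvLeftScanA, pvAnotB_eq, hg, htake, List.takeWhile_cons]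
    by_cases hb : pvIsB cs[n]
    · simp [hb]
    · have hlen : ((cs.take n).reverse.takeWhile (fun c => !pvIsB c)).length ≤ n := by
        calc _ ≤ (cs.take n).reverse.length := List.takeWhile_sublist _ |>.length_le
        _ ≤ n := by simp [List.length_take]
      simp only [hb, Bool.not_false, if_true]
      rw [ih (by omega)]
      simp only [List.length_cons]
      omega

theorem pvRightScanA_eq (cs : List Char) (t : Nat) (ht : t ≤ cs.length) :
    pvRightScanA cs t = t + ((cs.drop t).takeWhile (fun c => !pvIsB c)).length := by
  by_cases h : t < cs.length
  · have hg : cs.getD t ' ' = cs[t] := List.getD_eq_getElem cs ' ' h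
    have hdrop : cs.drop t = cs[t] :: cs.drop (t+1) := List.drop_eq_getElem_cons h
    rw [pvRightScanA]
    simp only [h, if_true, pvAnotB_eq, hg, hdrop, List.takeWhile_cons]
    by_cases hb : pvIsB cs[t]
    · simp [hb]
    · simp only [hb, Bool.not_false, if_true]
      rw [pvRightScanA_eq cs (t+1) (by omega)]
      simp only [List.length_cons]
      omega
  · have : t = cs.length := by omega
    subst this
    rw [pvRightScanA]
    simp
termination_by cs.length - t
decreasing_by omega

theorem pvTrimLA_eq (cs : List Char) (e s : Nat) (hse : s ≤ e) (he : e ≤ cs.length) :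
    pvTrimLA cs e s = s + (((cs.drop s).take (e - s)).takeWhile pvIsWT).length := by
  by_cases hlt : s < e
  · have hs : s < cs.length := by omega
    have hg : cs.getD s ' ' = cs[s] := List.getD_eq_getElem cs ' ' hs
    have hdrop : cs.drop s = cs[s] :: cs.drop (s+1) := List.drop_eq_getElem_cons hs
    have hes : e - s = (e - (s+1)) + 1 := by omega
    have hsplit : (cs.drop s).take (e - s) = cs[s] :: (cs.drop (s+1)).take (e - (s+1)) := by
      rw [hdrop, hes, List.take_succ_cons]
    rw [pvTrimLA, hsplit]
    by_cases hw : pvIsWT cs[s]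
    · rw [dif_pos ⟨hlt, by rw [hg]; exact hw⟩,
        pvTrimLA_eq cs e (s+1) (by omega) he,
        List.takeWhile_cons_of_pos hw, List.length_cons]
      omega
    · rw [dif_neg (by rw [hg]; tauto), List.takeWhile_cons_of_neg (by simpa using hw)]
      simp
  · rw [pvTrimLA]
    have h0 : e - s = 0 := by omega
    rw [dif_neg (by tauto), h0]
    simp
termination_by e - s
decreasing_by omega

theorem pvTrimRA_eq (cs : List Char) (s e : Nat) (hse : s ≤ e) (he : e ≤ cs.length) :
    pvTrimRA cs s e = e - (((cs.drop s).take (e - s)).reverse.takeWhile pvIsWT).length := by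
  by_cases hlt : s < e
  · have he1 : e - 1 < cs.length := by omega
    have hg : cs.getD (e-1) ' ' = cs[e-1] := List.getD_eq_getElem cs ' ' he1
    have hsplit : ((cs.drop s).take (e - s)).reverse
        = cs[e-1] :: ((cs.drop s).take (e - 1 - s)).reverse := by
      have h1 : e - s = (e - 1 - s) + 1 := by omega
      have h2 : (cs.drop s)[e - 1 - s]? = some cs[e-1] := by
        rw [List.getElem?_drop, List.getElem?_eq_getElem (by omega)]
        congr 1
        congr 1
        omega
      rw [h1, List.take_succ, h2]
      simp
    rw [pvTrimRA, hsplit]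
    by_cases hw : pvIsWT cs[e-1]
    · rw [dif_pos ⟨hlt, by rw [hg]; exact hw⟩,
        pvTrimRA_eq cs s (e-1) (by omega) (by omega),
        List.takeWhile_cons_of_pos hw, List.length_cons]
      have hlen : (((cs.drop s).take (e - 1 - s)).reverse.takeWhile pvIsWT).length ≤ e - 1 - s := by
        calc _ ≤ ((cs.drop s).take (e - 1 - s)).reverse.length := (List.takeWhile_sublist _).length_le
        _ ≤ e - 1 - s := by simp [List.length_take]
      omega
    · rw [dif_neg (by rw [hg]; tauto), List.takeWhile_cons_of_neg (by simpa using hw)]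
      simp
  · rw [pvTrimRA]
    have h0 : e - s = 0 := by omega
    rw [dif_neg (by tauto), h0]
    simp
termination_by e - s
decreasing_by omega

-- ===== B-side: the boundary-position index =====

def pvBpos (cs : List Char) (k : Int) : List Int :=
  ((PySem.List.enumerate cs k).filter (fun p => pvBoundaryB p.2)).map (fun p => p.1)

theorem pvBpos_nil (k : Int) : pvBpos [] k = [] := by
  simp [pvBpos, PySem.List.enumerate_nil]

theorem pvBpos_cons (a : Char) (cs : List Char) (k : Int) :
    pvBpos (a :: cs) k = (if pvIsB a then [k] else []) ++ pvBpos cs (k+1) := by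
  rw [pvBpos, PySem.List.enumerate_cons, List.filter_cons]
  by_cases h : pvIsB a <;> simp [pvBoundaryB_eq, h, pvBpos]

theorem pvBpos_append (l1 l2 : List Char) (k : Int) :
    pvBpos (l1 ++ l2) k = pvBpos l1 k ++ pvBpos l2 (k + l1.length) := by
  induction l1 generalizing k with
  | nil => simp [pvBpos_nil]
  | cons a t ih =>
    rw [List.cons_append, pvBpos_cons, pvBpos_cons, ih (k+1)]
    simp only [List.length_cons, List.append_assoc]
    congr 3
    push_cast
    ring

theorem pvBpos_mem (cs : List Char) (k p : Int) (h : p ∈ pvBpos cs k) :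
    k ≤ p ∧ p < k + cs.length := by
  induction cs generalizing k with
  | nil => simp [pvBpos_nil] at h
  | cons a t ih =>
    rw [pvBpos_cons, List.mem_append] at h
    rcases h with h | h
    · have hpk : p = k := by
        by_cases hb : pvIsB a
        · simpa [hb] using h
        · simp [hb] at h
      subst hpk
      simp only [List.length_cons]
      push_cast
      omega
    · have := ih (k+1) h
      constructor
      · omega
      · simp only [List.length_cons]
        push_cast
        omega

-- first boundary at/after t when the whole suffix starts at k ≥ t
theorem pvFindGe_ge (t : Int) (l : List Char) (k : Int) (hk : t ≤ k) :
    (pvBpos l k).find? (fun p => decide (t ≤ p))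
      = if (l.takeWhile (fun c => !pvIsB c)).length < l.length
        then some (k + ((l.takeWhile (fun c => !pvIsB c)).length : Int)) else none := by
  induction l generalizing k with
  | nil => simp [pvBpos_nil]
  | cons a w ih =>
    rw [pvBpos_cons, List.takeWhile_cons]
    by_cases hb : pvIsB a
    · simp [hb, List.find?_cons_of_pos, hk]
    · have hle : (w.takeWhile (fun c => !pvIsB c)).length ≤ w.length :=
        (List.takeWhile_sublist _).length_le
      simp only [hb, Bool.false_eq_true, if_false, Bool.not_false, if_true, List.nil_append,
        List.length_cons]
      rw [ih (k+1) (by omega)]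
      by_cases hlt : (w.takeWhile (fun c => !pvIsB c)).length < w.length
      · rw [if_pos hlt, if_pos (by omega)]
        congr 1
        push_cast
        ring
      · rw [if_neg hlt, if_neg (by omega)]

-- skipping the first m positions, all below t
theorem pvFindGe_skip (t : Int) (m : Nat) (l : List Char) :
    (pvBpos l (t - m)).find? (fun p => decide (t ≤ p))
      = (pvBpos (l.drop m) t).find? (fun p => decide (t ≤ p)) := by
  induction m generalizing l with
  | zero => simp
  | succ n ih =>
    cases l with
    | nil => simp [pvBpos_nil]
    | cons a w =>
      rw [pvBpos_cons, List.drop_succ_cons, ← ih w]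
      have harith : t - ((n+1 : Nat) : Int) + 1 = t - (n : Nat) := by push_cast; ring
      by_cases hb : pvIsB a
      · simp only [hb, if_true, List.singleton_append]
        rw [List.find?_cons_of_neg (by simp only [decide_eq_true_iff]; push_cast; omega), harith]
      · simp only [hb, Bool.false_eq_true, if_false, List.nil_append]
        rw [harith]

-- last boundary of l (positions counted from k)
theorem pvBpos_getLast (l : List Char) (k : Int) :
    (pvBpos l k).getLast?
      = if (l.reverse.takeWhile (fun c => !pvIsB c)).length < l.length
        then some (k + ((l.length - (l.reverse.takeWhile (fun c => !pvIsB c)).length - 1 : Nat) : Int))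
        else none := by
  induction l using List.reverseRecOn with
  | nil => simp [pvBpos_nil]
  | append_singleton w a ih =>
    rw [pvBpos_append, pvBpos_cons, pvBpos_nil, List.reverse_append]
    simp only [List.append_nil, List.reverse_cons, List.reverse_nil, List.nil_append,
      List.singleton_append, List.takeWhile_cons, List.length_append, List.length_cons,
      List.length_nil]
    by_cases hb : pvIsB a
    · simp only [hb, if_true, Bool.not_true, Bool.false_eq_true, if_false, List.length_nil]
      rw [List.getLast?_concat, if_pos (by omega)]
      have h1 : w.length + 1 - 0 - 1 = w.length := by omega
      rw [h1]
    · have hle : (w.reverse.takeWhile (fun c => !pvIsB c)).length ≤ w.length := by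
        calc _ ≤ w.reverse.length := (List.takeWhile_sublist _).length_le
        _ = w.length := by simp
      simp only [hb, Bool.false_eq_true, if_false, Bool.not_false, if_true, List.append_nil,
        List.length_cons]
      rw [ih]
      by_cases hlt : (w.reverse.takeWhile (fun c => !pvIsB c)).length < w.length
      · rw [if_pos hlt, if_pos (by omega)]
        have h2 : w.length + 1 - ((w.reverse.takeWhile (fun c => !pvIsB c)).length + 1) - 1
            = w.length - (w.reverse.takeWhile (fun c => !pvIsB c)).length - 1 := by omega
        rw [h2]
      · rw [if_neg hlt, if_neg (by omega)]

theorem pvFind?_of_all (l : List Int) (p : Int → Bool) (h : ∀ x ∈ l, p x) :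
    l.find? p = l.head? := by
  cases l with
  | nil => rfl
  | cons a t => rw [List.find?_cons_of_pos (h a (by simp)), List.head?_cons]

theorem pvContains_eq (c : Char) : ([' ', '\t'] : List Char).contains c = pvIsWT c := by
  by_cases h1 : c = ' ' <;> by_cases h2 : c = '\t' <;> simp [pvIsWT, h1, h2]

theorem pvDropWhile_eq_drop (p : Char → Bool) (l : List Char) :
    l.dropWhile p = l.drop (l.takeWhile p).length := by
  induction l with
  | nil => simp
  | cons a t ih =>
    by_cases h : p a <;> simp [h, ih]

theorem pvTrim_strip (cs : List Char) (s e : Nat) (hse : s ≤ e) (he : e ≤ cs.length) :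
    (cs.drop (pvTrimLA cs e s)).take (pvTrimRA cs (pvTrimLA cs e s) e - pvTrimLA cs e s)
      = PySem.Chars.stripChars ((cs.drop s).take (e - s)) [' ', '\t'] := by
  set L := (cs.drop s).take (e - s) with hL
  set t1 := (L.takeWhile pvIsWT).length with ht1
  have hLlen : L.length = e - s := by
    simp [hL, List.length_take, List.length_drop]
    omega
  have ht1le : t1 ≤ e - s := by
    rw [ht1, ← hLlen]
    exact (List.takeWhile_sublist _).length_le
  have hsL : pvTrimLA cs e s = s + t1 := pvTrimLA_eq cs e s hse he
  set s' := s + t1 with hs'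
  have hs'e : s' ≤ e := by omega
  set M := (cs.drop s').take (e - s') with hM
  have hMLdrop : M = L.drop t1 := by
    have h1 : e - s' = e - s - t1 := by omega
    have h2 : s' = t1 + s := by omega
    rw [hM, h1, h2, hL, List.drop_take, List.drop_drop, Nat.add_comm t1 s]
  have hMdw : M = L.dropWhile pvIsWT := by
    rw [hMLdrop, pvDropWhile_eq_drop, ht1]
  have hMlen : M.length = e - s' := by
    simp [hM, List.length_take, List.length_drop]
    omega
  set t2 := (M.reverse.takeWhile pvIsWT).length with ht2
  have ht2le : t2 ≤ M.length := by
    rw [ht2]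
    calc _ ≤ M.reverse.length := (List.takeWhile_sublist _).length_le
    _ = M.length := by simp
  have heR : pvTrimRA cs s' e = e - t2 := by
    rw [pvTrimRA_eq cs s' e hs'e he, ← hM, ← ht2]
  rw [hsL, heR]
  have hlhs : (cs.drop s').take (e - t2 - s') = M.take (M.length - t2) := by
    have hlen2 : (List.take (e - s') (List.drop s' cs)).length = e - s' := by
      simp only [List.length_take, List.length_drop]
      omega
    rw [hM, List.take_take]
    congr 1
    rw [hlen2]
    omega
  rw [hlhs]
  show _ = PySem.Chars.stripChars L [' ', '\t']
  simp only [PySem.Chars.stripChars]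
  have hp : (fun c => ([' ', '\t'] : List Char).contains c) = pvIsWT := funext pvContains_eq
  rw [hp, ← hMdw, pvDropWhile_eq_drop pvIsWT M.reverse, ← ht2, List.reverse_drop]
  simp

-- ===== main glue =====
theorem expand_to_sentence_py_spec : Claim_equal_expand_to_sentence_py := by
  unfold Claim_equal_expand_to_sentence_py
  intro st q _
  unfold Spec_expand_to_sentence_py expand_to_sentence_py expand_to_sentence_py_alt
  by_cases hq : q = ""
  · simp [hq]
  by_cases hneg : PySem.Str.find st q < 0
  · have hneg' : PySem.Chars.find st.toList q.toList < 0 := hneg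
    simp [hq, hneg']
  simp only [hq, if_false, hneg]
  have h0 : 0 ≤ PySem.Str.find st q := by omega
  have hfind : PySem.Str.find st q = PySem.Chars.find st.toList q.toList := rfl
  have hidxle : PySem.Str.find st q ≤ (st.toList.length : Int) := by
    rw [hfind]
    exact PySem.Chars.find_le_length _ _
  have hiidx : ((PySem.Str.find st q).toNat : Int) = PySem.Str.find st q := Int.toNat_of_nonneg h0
  set i := (PySem.Str.find st q).toNat with hi
  have hilen : i ≤ st.toList.length := by omega
  have hpre : q.toList <+: st.toList.drop i :=
    (PySem.Chars.find_spec (s := st.toList) (sub := q.toList) (by rw [← hfind]; exact h0)).1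
  have htaille : i + q.toList.length ≤ st.toList.length := by
    have hle := hpre.length_le
    rw [List.length_drop] at hle
    omega
  set cs := st.toList with hcs
  set tl := i + q.toList.length with htl
  set wr := ((cs.take i).reverse.takeWhile (fun c => !pvIsB c)).length with hwr
  set wf := ((cs.drop tl).takeWhile (fun c => !pvIsB c)).length with hwf
  have hA1 : pvLeftScanA cs i = i - wr := pvLeftScanA_eq cs i hilen
  have hA2 : pvRightScanA cs tl = tl + wf := pvRightScanA_eq cs tl htaille
  have hwrle : wr ≤ i := by
    rw [hwr]
    calc ((cs.take i).reverse.takeWhile (fun c => !pvIsB c)).length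
        ≤ (cs.take i).reverse.length := (List.takeWhile_sublist _).length_le
    _ ≤ i := by simp [List.length_take]
  have hwfle : tl + wf ≤ cs.length := by
    have h := (List.takeWhile_sublist (l := cs.drop tl) (fun c => !pvIsB c)).length_le
    rw [List.length_drop] at h
    omega
  have hsplit : pvBpos cs 0 = pvBpos (cs.take i) 0 ++ pvBpos (cs.drop i) i := by
    have h := pvBpos_append (cs.take i) (cs.drop i) 0
    rw [List.take_append_drop] at h
    have hk : (0 : Int) + (((cs.take i).length : Nat) : Int) = ((i : Nat) : Int) := by
      simp only [List.length_take]
      omega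
    rw [hk] at h
    exact h
  -- B's start equals A's left scan
  have hB1 : (((pvBpos cs 0).reverse.find? (fun p => decide (p < PySem.Str.find st q))).map
        (fun p => p + 1)).getD 0 = ((i - wr : Nat) : Int) := by
    rw [hsplit, List.reverse_append, List.find?_append]
    have hfail : (pvBpos (cs.drop i) i).reverse.find? (fun p => decide (p < PySem.Str.find st q))
        = none := by
      rw [List.find?_eq_none]
      intro x hx
      have := pvBpos_mem (cs.drop i) i x (by simpa using hx)
      simp only [decide_eq_true_iff]
      omega
    rw [hfail, Option.none_or]
    have hall : (pvBpos (cs.take i) 0).reverse.find? (fun p => decide (p < PySem.Str.find st q))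
        = (pvBpos (cs.take i) 0).reverse.head? := by
      apply pvFind?_of_all
      intro x hx
      have := pvBpos_mem (cs.take i) 0 x (by simpa using hx)
      have hlt : ((List.take i cs).length : Int) ≤ (i : Int) := by
        simp only [List.length_take]
        omega
      simp only [decide_eq_true_iff]
      omega
    rw [hall, List.head?_reverse, pvBpos_getLast]
    have hltake : (cs.take i).length = i := by simp [List.length_take]; omega
    rw [hltake, ← hwr]
    by_cases hcase : wr < i
    · rw [if_pos hcase]
      simp only [Option.map_some, Option.getD_some]
      omega
    · rw [if_neg hcase]
      simp only [Option.map_none, Option.getD_none]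
      omega
  -- B's end equals A's right scan
  have htlc : PySem.Str.find st q + PySem.Str.len q = ((tl : Nat) : Int) := by
    show _ + ((q.toList.length : Nat) : Int) = _
    omega
  have hB2 : ((pvBpos cs 0).find? (fun p => decide (PySem.Str.find st q + PySem.Str.len q ≤ p))).getD
        (PySem.Str.len st) = ((tl + wf : Nat) : Int) := by
    rw [htlc]
    have h00 : (0 : Int) = ((tl : Nat) : Int) - ((tl : Nat) : Int) := by ring
    rw [h00, pvFindGe_skip ((tl : Nat) : Int) tl cs, pvFindGe_ge _ _ _ (le_refl _), ← hwf]
    have hdl : (cs.drop tl).length = cs.length - tl := by simp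
    by_cases hcase : wf < (cs.drop tl).length
    · rw [if_pos hcase]
      simp only [Option.getD_some]
      push_cast
      ring_nf
    · rw [if_neg hcase]
      simp only [Option.getD_none]
      have hwf2 : wf = cs.length - tl := by
        have := (List.takeWhile_sublist (l := cs.drop tl) (fun c => !pvIsB c)).length_le
        rw [hdl] at this
        rw [hdl] at hcase
        omega
      rw [show PySem.Str.len st = ((cs.length : Nat) : Int) from rfl]
      omega
  rw [show ((PySem.List.enumerate cs 0).filter (fun p => pvBoundaryB p.2)).map (fun p => p.1)
        = pvBpos cs 0 from rfl, hB1, hB2, hA1, hA2]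
  -- both sides are ofList of the same character list
  show PySem.Str.slice st _ _ = _
  rw [PySem.Str.slice, PySem.Str.slice, PySem.Str.stripChars]
  rw [show (" \t" : String).toList = [' ', '\t'] from rfl]
  rw [PySem.Chars.slice_eq_listSlice, PySem.Chars.slice_eq_listSlice,
    PySem.List.slice_natCast, PySem.List.slice_natCast]
  rw [show (String.ofList (List.take ((tl + wf) - (i - wr)) (List.drop (i - wr) cs))).toList
      = List.take ((tl + wf) - (i - wr)) (List.drop (i - wr) cs) by simp]
  exact congrArg String.ofList
    (pvTrim_strip cs (i - wr) (tl + wf) (by omega) hwfle)
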